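-- pv_equiv track=rewrite | github.com/anshulku/Jigsaw_Puzzle | DvS.py | NumberOfPointInBetween
-- ===== SOURCE A (Python) =====
-- def NumberOfPointInBetween(startpoint,endpoint,approx):
--     startIndex = 0
--     endIndex = 0
--     count=0
--     for check in range(0,len(approx)):
--         startPoint=approx[check]
--         if(startPoint[0][0] == startpoint[0]  and startPoint[0][1] == startpoint[1]):
--             startIndex = check
--     for check in range(0,len(approx)):
--         startPoint=approx[check]
--         if(startPoint[0][0] == endpoint[0]  and startPoint[0][1] == endpoint[1]):
--             endIndex=check
--             break
--     startIndex = startIndex+1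
--     startCheck = startIndex
--     endCheck = endIndex-1
--     if(endCheck<0):
--         endCheck=len(approx)-1
--     if(startIndex>=len(approx)):
--         startIndex = 0
--     startCheck = startIndex
--     while(startIndex!=endIndex):
--         count=count+1
--         startIndex=startIndex+1
--         if(startIndex>=len(approx)):
--             startIndex=0
--     return [startCheck,endCheck,count]
-- ===== SOURCE B (Python) =====
-- def NumberOfPointInBetween(startpoint, endpoint, approx):
--     n = len(approx)
--     if n == 0:
--         return [0, -1, 0]
--     lastStart = 0
--     firstEnd = None
--     for i in range(n):
--         head = approx[i][0]
--         if head[0] == startpoint[0] and head[1] == startpoint[1]: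
--             lastStart = i
--         if firstEnd is None and head[0] == endpoint[0] and head[1] == endpoint[1]:
--             firstEnd = i
--     if firstEnd is None:
--         firstEnd = 0
--     startCheck = (lastStart + 1) % n
--     endCheck = (firstEnd - 1) % n
--     count = (firstEnd - startCheck) % n
--     return [startCheck, endCheck, count]
-- ===== Notes on version B (the rewrite author's own statement) =====
-- stated objective: simpler
-- what changed: B merges A's two index scans into one pass (last start-match, first end-match) and replaces A's pre-count wrap adjustments and counting while-loop by closed modular formulas (lastStart+1) % n, (firstEnd-1) % n and (firstEnd-startCheck) % n, with an n==0 guard returning [0,-1,0].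
-- outside the precondition, e.g. on NumberOfPointInBetween([0, 0], [1, 1], [[[1, 1]], [[1]]]): A returns [1, 1, 1], B returns [1, 1, 1]
import Mathlib
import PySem

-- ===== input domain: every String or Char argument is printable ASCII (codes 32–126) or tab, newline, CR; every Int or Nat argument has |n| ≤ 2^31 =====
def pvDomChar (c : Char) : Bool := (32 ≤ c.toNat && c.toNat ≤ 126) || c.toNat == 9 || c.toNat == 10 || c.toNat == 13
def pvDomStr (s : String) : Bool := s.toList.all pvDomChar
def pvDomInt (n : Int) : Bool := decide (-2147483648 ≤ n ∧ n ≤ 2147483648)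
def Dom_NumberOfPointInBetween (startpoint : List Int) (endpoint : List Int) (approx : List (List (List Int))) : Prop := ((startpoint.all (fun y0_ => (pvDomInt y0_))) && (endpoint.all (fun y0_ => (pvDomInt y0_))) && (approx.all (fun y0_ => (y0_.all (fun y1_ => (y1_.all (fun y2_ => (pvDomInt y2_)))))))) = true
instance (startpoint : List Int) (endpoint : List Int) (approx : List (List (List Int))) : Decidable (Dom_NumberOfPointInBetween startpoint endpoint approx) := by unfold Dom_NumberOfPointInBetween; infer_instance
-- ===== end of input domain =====

-- B replaces A's two index loops and the counting while-loop by one combined scan and a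
-- closed modular formula for the count (objective: simpler; return-value equivalence).


-- ===== PORT A =====
-- shared indexing helpers: Python's xs[i]; Pre_ guarantees the index is in range, the default is never taken
def pvGetI (xs : List Int) (i : Int) : Int := (PySem.List.pyGet? xs i).getD 0
def pvGetL (xs : List (List Int)) (i : Int) : List Int := (PySem.List.pyGet? xs i).getD []
def pvGetP (xs : List (List (List Int))) (i : Int) : List (List Int) := (PySem.List.pyGet? xs i).getD []
-- q[0] == pt[0] and q[1] == pt[1]
def pvMatch (q pt : List Int) : Bool := (pvGetI q 0 == pvGetI pt 0) && (pvGetI q 1 == pvGetI pt 1)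

-- A's second for-loop with its break: first matching index, else the initial 0
def pvAFirstEnd (endpoint : List Int) (approx : List (List (List Int))) : List Int → Int
  | [] => 0
  | check :: rest =>
    if pvMatch (pvGetL (pvGetP approx check) 0) endpoint then check
    else pvAFirstEnd endpoint approx rest

-- A's counting while-loop; fuel only makes it total (under Pre_ it never runs out)
def pvAWhile (n endIndex : Int) : Nat → Int → Int → Int × Int
  | 0, si, c => (si, c)
  | fuel + 1, si, c =>
    if si = endIndex then (si, c)
    else
      let si' := si + 1
      pvAWhile n endIndex fuel (if si' ≥ n then 0 else si') (c + 1)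

def NumberOfPointInBetween (startpoint : List Int) (endpoint : List Int) (approx : List (List (List Int))) : List Int :=
  let n : Int := approx.length
  let startIndex0 : Int := (PySem.List.pyRange 0 n).foldl
    (fun si check => if pvMatch (pvGetL (pvGetP approx check) 0) startpoint then check else si) 0
  let endIndex : Int := pvAFirstEnd endpoint approx (PySem.List.pyRange 0 n)
  let startIndex1 := startIndex0 + 1
  let endCheck0 := endIndex - 1
  let endCheck := if endCheck0 < 0 then n - 1 else endCheck0
  let startIndex := if startIndex1 ≥ n then 0 else startIndex1
  let startCheck := startIndex
  [startCheck, endCheck, (pvAWhile n endIndex approx.length startIndex 0).2]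

-- ===== PORT B =====
-- one pass: the last start-match (default 0) and the first end-match (None until found)
def pvBScan (startpoint endpoint : List Int) (approx : List (List (List Int))) : List Int → Int × Option Int → Int × Option Int
  | [], st => st
  | i :: rest, (ls, fe) =>
    let head := pvGetL (pvGetP approx i) 0
    let ls' := if pvMatch head startpoint then i else ls
    let fe' := match fe with
      | none => if pvMatch head endpoint then some i else none
      | some v => some v
    pvBScan startpoint endpoint approx rest (ls', fe')

def NumberOfPointInBetween_alt (startpoint : List Int) (endpoint : List Int) (approx : List (List (List Int))) : List Int :=
  let n : Int := approx.length
  if n = 0 then [0, -1, 0]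
  else
    let st := pvBScan startpoint endpoint approx (PySem.List.pyRange 0 n) (0, none)
    let firstEnd := st.2.getD 0
    let startCheck := PySem.Int.mod (st.1 + 1) n
    let endCheck := PySem.Int.mod (firstEnd - 1) n
    let count := PySem.Int.mod (firstEnd - startCheck) n
    [startCheck, endCheck, count]

-- ===== PRECONDITION & SPEC =====
-- Pre_ excludes exactly the inputs where the Python raises IndexError: with a non-empty approx,
-- both point lists and every compared inner point must be long enough for the accesses actually
-- performed (comparing coordinate 1 only happens when coordinate 0 already matched).  It is
-- slightly narrower than A's exact return domain: it also requires this of contour elements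
-- AFTER the first endpoint match, which A's second loop skips because of its break.
def Pre_NumberOfPointInBetween (startpoint : List Int) (endpoint : List Int) (approx : List (List (List Int))) : Prop :=
  approx = [] ∨
    (1 ≤ startpoint.length ∧ 1 ≤ endpoint.length ∧
      ∀ p ∈ approx, p ≠ [] ∧ p.headI ≠ [] ∧
        (p.headI.headI = startpoint.headI → 2 ≤ p.headI.length ∧ 2 ≤ startpoint.length) ∧
        (p.headI.headI = endpoint.headI → 2 ≤ p.headI.length ∧ 2 ≤ endpoint.length))
instance (startpoint : List Int) (endpoint : List Int) (approx : List (List (List Int))) : Decidable (Pre_NumberOfPointInBetween startpoint endpoint approx) := by unfold Pre_NumberOfPointInBetween; infer_instance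

def pvWitness_NumberOfPointInBetween : List Int × List Int × List (List (List Int)) :=
  ([0, 0], [1, 1], [[[0, 0]], [[2, 3]], [[1, 1]]])

def Spec_NumberOfPointInBetween (startpoint : List Int) (endpoint : List Int) (approx : List (List (List Int))) (out : List Int) : Prop := out = NumberOfPointInBetween_alt startpoint endpoint approx
instance (startpoint : List Int) (endpoint : List Int) (approx : List (List (List Int))) (out : List Int) : Decidable (Spec_NumberOfPointInBetween startpoint endpoint approx out) := by unfold Spec_NumberOfPointInBetween; infer_instance

-- ===== CLAIM (what is proved, stated in full; the proofs are below) =====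
def Claim_equal_NumberOfPointInBetween : Prop := ∀ (startpoint : List Int) (endpoint : List Int) (approx : List (List (List Int))), Dom_NumberOfPointInBetween startpoint endpoint approx → Pre_NumberOfPointInBetween startpoint endpoint approx → Spec_NumberOfPointInBetween startpoint endpoint approx (NumberOfPointInBetween startpoint endpoint approx)

-- ===== LEMMAS AND PROOFS =====

-- B's scan, first component = A's first foldl (same step, threaded through the pair state)
theorem pvBScan_fst (sp ep : List Int) (ap : List (List (List Int))) :
    ∀ (idxs : List Int) (st : Int × Option Int),
      (pvBScan sp ep ap idxs st).1 =
        idxs.foldl (fun si check => if pvMatch (pvGetL (pvGetP ap check) 0) sp then check else si) st.1 := by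
  intro idxs
  induction idxs with
  | nil => intro st; rfl
  | cons i rest ih =>
    intro st
    obtain ⟨ls, fe⟩ := st
    simp only [pvBScan, List.foldl_cons]
    rw [ih]

-- once the first end-match is recorded it never changes
theorem pvBScan_some (sp ep : List Int) (ap : List (List (List Int))) :
    ∀ (idxs : List Int) (ls v : Int),
      (pvBScan sp ep ap idxs (ls, some v)).2 = some v := by
  intro idxs
  induction idxs with
  | nil => intro ls v; rfl
  | cons i rest ih => intro ls v; simp only [pvBScan]; exact ih _ _

-- B's scan, second component (with default 0) = A's break-loop
theorem pvBScan_snd (sp ep : List Int) (ap : List (List (List Int))) :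
    ∀ (idxs : List Int) (ls : Int),
      ((pvBScan sp ep ap idxs (ls, none)).2).getD 0 = pvAFirstEnd ep ap idxs := by
  intro idxs
  induction idxs with
  | nil => intro ls; rfl
  | cons i rest ih =>
    intro ls
    simp only [pvBScan, pvAFirstEnd]
    by_cases h : pvMatch (pvGetL (pvGetP ap i) 0) ep = true
    · simp [h, pvBScan_some]
    · simp [h, ih]

-- a last-match fold yields its start value or a member of the index list
theorem foldl_choice (P : Int → Bool) :
    ∀ (idxs : List Int) (a : Int),
      idxs.foldl (fun si check => if P check then check else si) a = a ∨
      idxs.foldl (fun si check => if P check then check else si) a ∈ idxs := by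
  intro idxs
  induction idxs with
  | nil => intro a; left; rfl
  | cons i rest ih =>
    intro a
    simp only [List.foldl_cons]
    by_cases h : P i = true
    · simp only [h, if_pos]
      rcases ih i with h' | h'
      · right; rw [h']; exact List.mem_cons_self
      · right; exact List.mem_cons_of_mem _ h'
    · simp only [h, if_neg, Bool.false_eq_true, not_false_iff]
      rcases ih a with h' | h'
      · left; exact h'
      · right; exact List.mem_cons_of_mem _ h'

theorem pvAFirstEnd_choice (ep : List Int) (ap : List (List (List Int))) :
    ∀ (idxs : List Int), pvAFirstEnd ep ap idxs = 0 ∨ pvAFirstEnd ep ap idxs ∈ idxs := by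
  intro idxs
  induction idxs with
  | nil => left; rfl
  | cons i rest ih =>
    simp only [pvAFirstEnd]
    by_cases h : pvMatch (pvGetL (pvGetP ap i) 0) ep = true
    · right; simp [h]
    · rcases ih with h' | h'
      · left; simpa [h]
      · right; simp [h]; right; exact h'

-- circular distance written without %
theorem emod_dist (n s e : Int) (hs0 : 0 ≤ s) (hsn : s < n) (he0 : 0 ≤ e) (hen : e < n) :
    (e - s) % n = if s ≤ e then e - s else e - s + n := by
  split_ifs with h
  · exact Int.emod_eq_of_lt (by omega) (by omega)
  · rw [← Int.add_emod_right (e - s) n]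
    exact Int.emod_eq_of_lt (by omega) (by omega)

-- the while-loop: ends at endIndex and counts the circular distance
theorem pvAWhile_spec (n e : Int) (he0 : 0 ≤ e) (hen : e < n) :
    ∀ (fuel : Nat) (s c : Int), 0 ≤ s → s < n → ((e - s) % n).toNat ≤ fuel →
      pvAWhile n e fuel s c = (e, c + (e - s) % n) := by
  intro fuel
  induction fuel with
  | zero =>
    intro s c hs0 hsn hf
    have hd := emod_dist n s e hs0 hsn he0 hen
    have hse : s = e := by
      by_cases h : s ≤ e <;> simp [h] at hd <;> omega
    subst hse
    simp only [pvAWhile]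
    rw [hd]; simp
  | succ fuel ih =>
    intro s c hs0 hsn hf
    have hd := emod_dist n s e hs0 hsn he0 hen
    by_cases hse : s = e
    · subst hse
      simp only [pvAWhile]
      rw [hd]; simp
    · simp only [pvAWhile, if_neg hse]
      have hn2 : 2 ≤ n := by omega
      by_cases hwrap : s + 1 ≥ n
      · rw [if_pos hwrap]
        have hd' := emod_dist n 0 e (le_refl 0) (by omega) he0 hen
        have hb : ((e - 0) % n).toNat ≤ fuel := by
          rw [hd']; rw [hd] at hf; split_ifs at hf ⊢ <;> omega
        rw [ih 0 (c + 1) (le_refl 0) (by omega) hb, hd', hd]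
        simp only [Prod.mk.injEq]
        split_ifs <;> exact ⟨trivial, by omega⟩
      · rw [if_neg hwrap]
        have hd' := emod_dist n (s + 1) e (by omega) (by omega) he0 hen
        have hb : ((e - (s + 1)) % n).toNat ≤ fuel := by
          rw [hd']; rw [hd] at hf; split_ifs at hf ⊢ <;> omega
        rw [ih (s + 1) (c + 1) (by omega) (by omega) hb, hd', hd]
        simp only [Prod.mk.injEq]
        split_ifs <;> exact ⟨trivial, by omega⟩

-- ===== VERDICT (by name: the statement is the Claim_ definition above) =====
theorem NumberOfPointInBetween_spec : Claim_equal_NumberOfPointInBetween := by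
  unfold Claim_equal_NumberOfPointInBetween
  intro sp ep ap _ _
  unfold Spec_NumberOfPointInBetween
  by_cases hnil : ap = []
  · subst hnil; rfl
  · have hlen : 0 < ap.length := List.length_pos_iff.mpr hnil
    have hn : (0 : Int) < (ap.length : Int) := by exact_mod_cast hlen
    simp only [NumberOfPointInBetween, NumberOfPointInBetween_alt]
    rw [if_neg (by omega : ¬ ((ap.length : Int) = 0))]
    rw [pvBScan_fst, pvBScan_snd]
    set n : Int := (ap.length : Int) with hnn
    set L := (PySem.List.pyRange 0 n).foldl
      (fun si check => if pvMatch (pvGetL (pvGetP ap check) 0) sp then check else si) 0 with hL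
    set E := pvAFirstEnd ep ap (PySem.List.pyRange 0 n) with hE
    have hLb : 0 ≤ L ∧ L < n := by
      rcases foldl_choice (fun check => pvMatch (pvGetL (pvGetP ap check) 0) sp)
        (PySem.List.pyRange 0 n) 0 with h | h
      · rw [hL, h]; omega
      · have := PySem.List.mem_pyRange_one.mp (hL ▸ h); omega
    have hEb : 0 ≤ E ∧ E < n := by
      rcases pvAFirstEnd_choice ep ap (PySem.List.pyRange 0 n) with h | h
      · rw [hE, h]; omega
      · have := PySem.List.mem_pyRange_one.mp (hE ▸ h); omega
    have hS : PySem.Int.mod (L + 1) n = if L + 1 ≥ n then 0 else L + 1 := by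
      rw [PySem.Int.mod_eq_emod_of_pos hn]
      split_ifs with h
      · have : L + 1 = n := by omega
        rw [this, Int.emod_self]
      · exact Int.emod_eq_of_lt (by omega) (by omega)
    have hEC : PySem.Int.mod (E - 1) n = if E - 1 < 0 then n - 1 else E - 1 := by
      rw [PySem.Int.mod_eq_emod_of_pos hn]
      split_ifs with h
      · rw [show E - 1 = (n - 1) - n by omega, Int.sub_emod_right]
        exact Int.emod_eq_of_lt (by omega) (by omega)
      · exact Int.emod_eq_of_lt (by omega) (by omega)
    set S := if L + 1 ≥ n then 0 else L + 1 with hSdef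
    have hSb : 0 ≤ S ∧ S < n := by rw [hSdef]; split_ifs <;> omega
    have hW : pvAWhile n E ap.length S 0 = (E, 0 + (E - S) % n) := by
      apply pvAWhile_spec n E hEb.1 hEb.2 ap.length S 0 hSb.1 hSb.2
      have h1 : (E - S) % n < n := Int.emod_lt_of_pos _ hn
      have h2 : 0 ≤ (E - S) % n := Int.emod_nonneg _ (by omega)
      omega
    rw [hS, hW, hEC, PySem.Int.mod_eq_emod_of_pos hn]
    simp
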